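-- pv_equiv track=rewrite | github.com/joshmaster2165/medusa | src/medusa/checks/integrity/intg003_config_tampering_risk.py | _is_risky_path
-- ===== SOURCE A (Python) =====
-- _RISKY_PREFIXES: tuple[str, ...] = (
--     "/tmp/",
--     "/tmp",
--     "/var/tmp/",
--     "/var/tmp",
--     "/dev/shm/",
--     "/dev/shm",
-- )
--
-- _RISKY_SUBSTRINGS: tuple[str, ...] = (
--     "/temp/",
--     "/tmp/",
--     "/var/tmp/",
--     "/dev/shm/",
-- )
--
-- def _is_risky_path(path: str) -> bool:
--     """Return True if the path is in a world-writable or temp directory."""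
--     normalised = path.lower().replace("\\", "/")
--
--     # Check prefixes.
--     for prefix in _RISKY_PREFIXES:
--         if prefix.endswith("/"):
--             if normalised.startswith(prefix):
--                 return True
--         else:
--             if normalised == prefix or normalised.startswith(prefix + "/"):
--                     return True
--
--     # Check substrings for embedded temp directories.
--     for substr in _RISKY_SUBSTRINGS:
--         if substr in normalised:
--             return True
--
--     return False
-- ===== SOURCE B (Python) =====
-- def _is_risky_path(path: str) -> bool:
--     """Return True if the path is in a world-writable or temp directory."""
--     normalised = path.lower().replace("\\", "/")
--     return normalised in ("/tmp", "/var/tmp", "/dev/shm") or any(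
--         s in normalised for s in ("/temp/", "/tmp/", "/var/tmp/", "/dev/shm/")
--     )
-- ===== Notes on version B (the rewrite author's own statement) =====
-- stated objective: simpler
-- what changed: Replaces the two-loop prefix/substring scan (with its endswith-branching and prefix+'/' startswith logic) by a single expression: exact-match membership in the three bare directory names plus substring membership of the four slash-terminated markers, using the fact that every anchored startswith test is subsumed by an unanchored substring test.
import Mathlib
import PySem

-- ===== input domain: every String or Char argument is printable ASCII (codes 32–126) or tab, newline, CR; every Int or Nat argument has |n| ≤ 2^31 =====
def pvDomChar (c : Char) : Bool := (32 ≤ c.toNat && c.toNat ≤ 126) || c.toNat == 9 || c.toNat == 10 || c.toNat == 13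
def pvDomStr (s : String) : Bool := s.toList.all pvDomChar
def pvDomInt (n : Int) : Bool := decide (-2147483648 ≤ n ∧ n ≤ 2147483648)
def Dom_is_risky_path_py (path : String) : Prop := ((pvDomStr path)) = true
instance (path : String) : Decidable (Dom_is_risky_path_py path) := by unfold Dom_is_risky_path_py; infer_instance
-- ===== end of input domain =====

-- B replaces A's two early-return loops (prefix checks with endswith branching, then substring checks)
-- by one expression: exact-match membership in the three bare directory names plus the four substring
-- tests, since every anchored startswith test is subsumed by the corresponding substring test (simpler).

-- ===== PORT A =====
def riskyPrefixesA : List String := ["/tmp/", "/tmp", "/var/tmp/", "/var/tmp", "/dev/shm/", "/dev/shm"]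
def riskySubstringsA : List String := ["/temp/", "/tmp/", "/var/tmp/", "/dev/shm/"]

-- 'for prefix in _RISKY_PREFIXES: …' with its early returns
def checkPrefixesA : List String → String → Bool
  | [], _ => false
  | p :: rest, n =>
    if PySem.Str.endswith p "/" then
      if PySem.Str.startswith n p then true else checkPrefixesA rest n
    else
      if n == p || PySem.Str.startswith n (p ++ "/") then true else checkPrefixesA rest n

-- 'for substr in _RISKY_SUBSTRINGS: …' with its early returns
def checkSubstringsA : List String → String → Bool
  | [], _ => false
  | s :: rest, n => if PySem.Str.isIn s n then true else checkSubstringsA rest n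

def is_risky_path_py (path : String) : Bool :=
  let normalised := PySem.Str.replace (PySem.Str.lower path) "\\" "/"
  if checkPrefixesA riskyPrefixesA normalised then true
  else if checkSubstringsA riskySubstringsA normalised then true
  else false

-- ===== PORT B =====
def is_risky_path_py_alt (path : String) : Bool :=
  let normalised := PySem.Str.replace (PySem.Str.lower path) "\\" "/"
  ["/tmp", "/var/tmp", "/dev/shm"].any (fun t => normalised == t) ||
    ["/temp/", "/tmp/", "/var/tmp/", "/dev/shm/"].any (fun s => PySem.Str.isIn s normalised)

-- ===== PRECONDITION & SPEC =====
def Spec_is_risky_path_py (path : String) (out : Bool) : Prop := out = is_risky_path_py_alt path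
instance (path : String) (out : Bool) : Decidable (Spec_is_risky_path_py path out) := by unfold Spec_is_risky_path_py; infer_instance

-- ===== CLAIM (what is proved, stated in full; the proofs are below) =====
def Claim_equal_is_risky_path_py : Prop := ∀ (path : String), Dom_is_risky_path_py path → Spec_is_risky_path_py path (is_risky_path_py path)

-- ===== LEMMAS AND PROOFS =====

-- an anchored startswith test is subsumed by the unanchored substring test
lemma startswith_isIn (n p : String) (h : PySem.Str.startswith n p = true) :
    PySem.Str.isIn p n = true := by
  simp only [PySem.Str.isIn_eq, PySem.Str.startswith_eq] at *
  rw [PySem.Chars.isIn_iff_infix]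
  rw [PySem.Chars.startswith_iff] at h
  exact h.isInfix

set_option maxHeartbeats 1000000 in
lemma core_eq (n : String) :
    (if checkPrefixesA riskyPrefixesA n then true
     else if checkSubstringsA riskySubstringsA n then true else false) =
    (["/tmp", "/var/tmp", "/dev/shm"].any (fun t => n == t) ||
      ["/temp/", "/tmp/", "/var/tmp/", "/dev/shm/"].any (fun s => PySem.Str.isIn s n)) := by
  have e1 : PySem.Str.endswith "/tmp/" "/" = true := by decide
  have e2 : PySem.Str.endswith "/tmp" "/" = false := by decide
  have e3 : PySem.Str.endswith "/var/tmp/" "/" = true := by decide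
  have e4 : PySem.Str.endswith "/var/tmp" "/" = false := by decide
  have e5 : PySem.Str.endswith "/dev/shm/" "/" = true := by decide
  have e6 : PySem.Str.endswith "/dev/shm" "/" = false := by decide
  have a1 : ("/tmp" ++ "/" : String) = "/tmp/" := by decide
  have a2 : ("/var/tmp" ++ "/" : String) = "/var/tmp/" := by decide
  have a3 : ("/dev/shm" ++ "/" : String) = "/dev/shm/" := by decide
  have h1 := startswith_isIn n "/tmp/"
  have h2 := startswith_isIn n "/var/tmp/"
  have h3 := startswith_isIn n "/dev/shm/"
  rw [Bool.eq_iff_iff]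
  simp only [riskyPrefixesA, riskySubstringsA, checkPrefixesA, checkSubstringsA,
    e1, e2, e3, e4, e5, e6, a1, a2, a3, if_true, Bool.false_eq_true, if_false,
    List.any_cons, List.any_nil, Bool.or_eq_true, beq_iff_eq,
    Bool.if_true_left, Bool.if_false_right, decide_eq_true_eq, Bool.and_true, or_false]
  constructor
  · rintro ((p | (e | p) | p | (e | p) | p | e | p) | s)
    · exact Or.inr (Or.inr (Or.inl (h1 p)))
    · exact Or.inl (Or.inl e)
    · exact Or.inr (Or.inr (Or.inl (h1 p)))
    · exact Or.inr (Or.inr (Or.inr (Or.inl (h2 p))))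
    · exact Or.inl (Or.inr (Or.inl e))
    · exact Or.inr (Or.inr (Or.inr (Or.inl (h2 p))))
    · exact Or.inr (Or.inr (Or.inr (Or.inr (h3 p))))
    · exact Or.inl (Or.inr (Or.inr e))
    · exact Or.inr (Or.inr (Or.inr (Or.inr (h3 p))))
    · exact Or.inr s
  · rintro ((e | e | e) | s)
    · exact Or.inl (Or.inr (Or.inl (Or.inl e)))
    · exact Or.inl (Or.inr (Or.inr (Or.inr (Or.inl (Or.inl e)))))
    · exact Or.inl (Or.inr (Or.inr (Or.inr (Or.inr (Or.inr (Or.inl e))))))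
    · exact Or.inr s

-- ===== VERDICT (by name: the statement is the Claim_ definition above) =====
theorem is_risky_path_py_spec : Claim_equal_is_risky_path_py := by
  intro path _
  unfold Spec_is_risky_path_py is_risky_path_py is_risky_path_py_alt
  exact core_eq _
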